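-- pv_equiv track=rewrite | github.com/LiveBench/liveswebench | liveswebench/collect/process_patch.py | has_contiguous_additions
-- ===== SOURCE A (Python) =====
-- def has_contiguous_additions(hunk_lines):
--     """
--     Check if additions in a hunk are contiguous after applying all deletions.
--
--     Args:
--         hunk_lines (list): Lines of the hunk
--
--     Returns:
--         bool: True if additions are contiguous (possibly separated by whitespace), False otherwise
--     """
--     # Skip hunk header lines
--     content_lines = []
--     for line in hunk_lines:
--         if not line.startswith('@@') and not line.startswith('---') and not line.startswith('+++'):
--             # Keep context lines and addition lines, remove deletion lines
--             if not line.startswith('-'):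
--                 content_lines.append(line)
--
--     addition_indices = []
--     for i, line in enumerate(content_lines):
--         if line.startswith('+'):
--             addition_indices.append(i)
--
--     if not addition_indices:
--         return False
--
--     # Check if additions are contiguous (or separated by whitespace)
--     for i in range(len(addition_indices) - 1):
--         has_non_whitespace = False
--         for j in range(addition_indices[i] + 1, addition_indices[i + 1]):
--             # If there's a non-whitespace line between additions, they're not contiguous
--             if j < len(content_lines) and not content_lines[j].startswith('+'):
--                 line_content = content_lines[j][1:] if content_lines[j].startswith(' ') else content_lines[j]
--                 if line_content.strip():  # If there's non-whitespace content
--                     has_non_whitespace = True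
--                     break
--
--         if has_non_whitespace:
--             return False
--
--     return True
-- ===== SOURCE B (Python) =====
-- def has_contiguous_additions(hunk_lines):
--     """Single streaming pass: no content_lines list, no index lists."""
--     seen = False
--     pending = False
--     for line in hunk_lines:
--         if line.startswith(('@@', '---', '+++', '-')):
--             continue
--         if line.startswith('+'):
--             if seen and pending:
--                 return False
--             seen = True
--             pending = False
--         elif seen:
--             content = line[1:] if line.startswith(' ') else line
--             if content.strip():
--                 pending = True
--     return seen
-- ===== Notes on version B (the rewrite author's own statement) =====
-- stated objective: simpler
-- what changed: Replaced A's three-pass pipeline (build content_lines, collect addition indices, scan each index gap) by one streaming pass over hunk_lines with two booleans (seen addition / pending non-whitespace), allocating no intermediate lists.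
import Mathlib
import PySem

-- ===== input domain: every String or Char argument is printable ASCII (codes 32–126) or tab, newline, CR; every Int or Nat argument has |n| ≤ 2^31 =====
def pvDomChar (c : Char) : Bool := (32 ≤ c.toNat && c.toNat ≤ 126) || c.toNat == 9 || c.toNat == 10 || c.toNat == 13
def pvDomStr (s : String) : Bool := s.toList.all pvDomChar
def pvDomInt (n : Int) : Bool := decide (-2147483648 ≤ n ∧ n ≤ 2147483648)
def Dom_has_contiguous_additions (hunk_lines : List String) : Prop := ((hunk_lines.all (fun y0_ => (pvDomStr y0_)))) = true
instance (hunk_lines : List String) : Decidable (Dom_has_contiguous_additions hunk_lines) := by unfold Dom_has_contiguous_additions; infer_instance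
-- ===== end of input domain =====

-- B replaces A's three-pass pipeline (content list, index list, per-pair gap scans) by one
-- streaming pass with two booleans; objective: simpler (no intermediate lists).

-- ===== PORT A =====
-- line_content.strip() truthiness check of A (with the leading-space strip rule)
def pvNbA (line : String) : Bool :=
  !(PySem.Str.strip (if PySem.Str.startswith line " " then PySem.Str.slice line (some 1) none else line) == "")

def pvA_content (hunk_lines : List String) : List String :=
  hunk_lines.foldl (fun acc line =>
    if !(PySem.Str.startswith line "@@") && !(PySem.Str.startswith line "---") && !(PySem.Str.startswith line "+++") then
      if !(PySem.Str.startswith line "-") then acc ++ [line] else acc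
    else acc) []

def pvA_idx (cs : List String) : List Int :=
  (PySem.List.enumerate cs 0).foldl (fun acc p => if PySem.Str.startswith p.2 "+" then acc ++ [p.1] else acc) []

-- inner loop of A (with its early break = .any): j from idx[i]+1 to idx[i+1]-1
def pvA_gapBad (cs : List String) (a b : Int) : Bool :=
  (PySem.List.pyRange a b 1).any (fun j =>
    decide (j < (cs.length : Int)) &&
    (!(PySem.Str.startswith (PySem.List.pyGetD cs j "") "+") &&
     pvNbA (PySem.List.pyGetD cs j "")))

def has_contiguous_additions (hunk_lines : List String) : Bool :=
  let cs := pvA_content hunk_lines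
  let idx := pvA_idx cs
  if idx.isEmpty then false
  else
    !((PySem.List.pyRange 0 ((idx.length : Int) - 1) 1).any (fun i =>
      pvA_gapBad cs (PySem.List.pyGetD idx i 0 + 1) (PySem.List.pyGetD idx (i + 1) 0)))

-- ===== PORT B =====
def pvB_skip (line : String) : Bool :=
  PySem.Str.startswith line "@@" || PySem.Str.startswith line "---" ||
  PySem.Str.startswith line "+++" || PySem.Str.startswith line "-"

def pvNbB (line : String) : Bool :=
  !(PySem.Str.strip (if PySem.Str.startswith line " " then PySem.Str.slice line (some 1) none else line) == "")

def pvB_go : List String → Bool → Bool → Bool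
  | [], seen, _ => seen
  | line :: rest, seen, pending =>
    if pvB_skip line then pvB_go rest seen pending
    else if PySem.Str.startswith line "+" then
      (if seen && pending then false else pvB_go rest true false)
    else pvB_go rest seen (pending || (seen && pvNbB line))

def has_contiguous_additions_alt (hunk_lines : List String) : Bool :=
  pvB_go hunk_lines false false

-- ===== PRECONDITION & SPEC =====
def Spec_has_contiguous_additions (hunk_lines : List String) (out : Bool) : Prop := out = has_contiguous_additions_alt hunk_lines
instance (hunk_lines : List String) (out : Bool) : Decidable (Spec_has_contiguous_additions hunk_lines out) := by unfold Spec_has_contiguous_additions; infer_instance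

-- ===== CLAIM (what is proved, stated in full; the proofs are below) =====
def Claim_equal_has_contiguous_additions : Prop := ∀ (hunk_lines : List String), Dom_has_contiguous_additions hunk_lines → Spec_has_contiguous_additions hunk_lines (has_contiguous_additions hunk_lines)

-- ===== LEMMAS AND PROOFS =====

def pvPl (l : String) : Bool := PySem.Str.startswith l "+"
def pvKeep (l : String) : Bool := !pvB_skip l

-- reference form of A's addition_indices, with explicit start offset
def pvIdxs : List String → Int → List Int
  | [], _ => []
  | l :: ls, s => if pvPl l then s :: pvIdxs ls (s + 1) else pvIdxs ls (s + 1)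

-- reference form of A's outer gap loop: consecutive-pair recursion
def pvGaps (cs : List String) : List Int → Bool
  | a :: b :: r => pvA_gapBad cs (a + 1) b || pvGaps cs (b :: r)
  | _ => false

-- reference form of B's scan after the first addition (pend = non-blank line seen since)
def pvChk : List String → Bool → Bool
  | [], _ => true
  | l :: ls, pend =>
    if pvPl l then (if pend then false else pvChk ls false)
    else pvChk ls (pend || pvNbA l)

-- reference form of B's scan before the first addition
def pvR : List String → Bool
  | [] => false
  | l :: ls => if pvPl l then pvChk ls false else pvR ls

def pvAcore (cs : List String) : Bool :=
  if (pvIdxs cs 0).isEmpty then false else !pvGaps cs (pvIdxs cs 0)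

theorem pv_content_eq (h : List String) : pvA_content h = h.filter pvKeep := by
  unfold pvA_content
  have : (fun (acc : List String) line =>
      if !(PySem.Str.startswith line "@@") && !(PySem.Str.startswith line "---") && !(PySem.Str.startswith line "+++") then
        if !(PySem.Str.startswith line "-") then acc ++ [line] else acc
      else acc) = (fun acc line => if pvKeep line then acc ++ [line] else acc) := by
    funext acc line
    simp only [pvKeep, pvB_skip]
    by_cases h1 : PySem.Str.startswith line "@@" = true <;>
      by_cases h2 : PySem.Str.startswith line "---" = true <;>
      by_cases h3 : PySem.Str.startswith line "+++" = true <;>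
      by_cases h4 : PySem.Str.startswith line "-" = true <;> simp_all
  rw [this, PySem.List.foldl_append_if_eq_filter]
  simp

theorem pv_idx_acc (cs : List String) : ∀ (s : Int) (acc : List Int),
    (PySem.List.enumerate cs s).foldl (fun acc p => if PySem.Str.startswith p.2 "+" then acc ++ [p.1] else acc) acc
      = acc ++ pvIdxs cs s := by
  induction cs with
  | nil => intro s acc; simp [PySem.List.enumerate_nil, pvIdxs]
  | cons l ls ih =>
    intro s acc
    rw [PySem.List.enumerate_cons]
    simp only [List.foldl_cons, pvIdxs, pvPl]
    rw [ih]
    split_ifs <;> simp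

theorem pv_idx_eq (cs : List String) : pvA_idx cs = pvIdxs cs 0 := by
  unfold pvA_idx; rw [pv_idx_acc]; simp

theorem pv_idxs_shift (cs : List String) : ∀ s : Int, pvIdxs cs (s + 1) = (pvIdxs cs s).map (· + 1) := by
  induction cs with
  | nil => intro s; simp [pvIdxs]
  | cons l ls ih =>
    intro s
    simp only [pvIdxs]
    by_cases h : pvPl l = true <;> simp [h, ih]

theorem pv_idxs_nonneg (cs : List String) : ∀ (s x : Int), x ∈ pvIdxs cs s → s ≤ x := by
  induction cs with
  | nil => intro s x hx; simp [pvIdxs] at hx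
  | cons l ls ih =>
    intro s x hx
    simp only [pvIdxs] at hx
    by_cases h : pvPl l = true <;> simp [h] at hx
    · rcases hx with rfl | hx
      · omega
      · have := ih (s+1) x hx; omega
    · have := ih (s+1) x hx; omega

theorem pv_getD_shift {α : Type} (x : α) (xs : List α) (i : Int) (d : α) (hi : 0 ≤ i) :
    PySem.List.pyGetD (x :: xs) (i + 1) d = PySem.List.pyGetD xs i d := by
  have h1 : i = ((i.toNat : Nat) : Int) := by omega
  rw [h1]
  have h2 : ((i.toNat : Nat) : Int) + 1 = ((i.toNat + 1 : Nat) : Int) := by push_cast; ring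
  rw [h2, PySem.List.pyGetD_natCast, PySem.List.pyGetD_natCast, List.getD_cons_succ]

theorem pv_gap_shift (l : String) (ls : List String) (a b : Int) (ha : 0 ≤ a) :
    pvA_gapBad (l :: ls) (a + 1) (b + 1) = pvA_gapBad ls a b := by
  unfold pvA_gapBad
  rw [PySem.List.pyRange_one (a + 1) (b + 1), PySem.List.pyRange_one a b]
  have hn : (b + 1 - (a + 1)).toNat = (b - a).toNat := by omega
  rw [hn, List.any_map, List.any_map]
  apply PySem.List.any_congr_mem
  intro k hk
  simp only [Function.comp]
  have e2 : PySem.List.pyGetD (l :: ls) (a + 1 + (k : Int)) "" = PySem.List.pyGetD ls (a + (k : Int)) "" := by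
    rw [show a + 1 + (k : Int) = (a + (k : Int)) + 1 by omega]
    exact pv_getD_shift l ls (a + (k : Int)) "" (by omega)
  have e1 : decide (a + 1 + (k : Int) < (((l :: ls).length) : Int)) = decide (a + (k : Int) < ((ls.length) : Int)) := by
    apply decide_eq_decide.mpr
    simp only [List.length_cons]
    push_cast
    omega
  rw [e1, e2]

theorem pv_gap_zero (l : String) (ls : List String) (k : Int) (hl : pvPl l = false) (hk : 0 ≤ k) :
    pvA_gapBad (l :: ls) 0 (k + 1) = (pvNbA l || pvA_gapBad ls 0 k) := by
  have hsplit : pvA_gapBad (l :: ls) 0 (k + 1) =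
      ((decide ((0:Int) < ((l :: ls).length : Int)) &&
        (!(PySem.Str.startswith (PySem.List.pyGetD (l :: ls) (0:Int) "") "+") &&
         pvNbA (PySem.List.pyGetD (l :: ls) (0:Int) ""))) || pvA_gapBad (l :: ls) 1 (k + 1)) := by
    unfold pvA_gapBad
    rw [PySem.List.pyRange_one_cons (by omega : (0:Int) < k + 1)]
    simp [List.any_cons]
  rw [hsplit]
  have h1 : pvA_gapBad (l :: ls) 1 (k + 1) = pvA_gapBad ls 0 k := by
    have := pv_gap_shift l ls 0 k (le_refl 0)
    simpa using this
  rw [h1]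
  have h0 : PySem.List.pyGetD (l :: ls) (0:Int) "" = l := by
    simp [PySem.List.pyGetD_zero_cons]
  rw [h0]
  have hpl : PySem.Str.startswith l "+" = false := by simpa [pvPl] using hl
  rw [hpl]
  have hlen : decide ((0:Int) < ((l :: ls).length : Int)) = true := by simp
  rw [hlen]
  simp

theorem pv_gaps_shift (l : String) (ls : List String) : ∀ (idx : List Int),
    (∀ x ∈ idx, -1 ≤ x) → pvGaps (l :: ls) (idx.map (· + 1)) = pvGaps ls idx := by
  intro idx
  induction idx with
  | nil => intro _; simp [pvGaps]
  | cons a t ih =>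
    intro hnn
    cases t with
    | nil => simp [pvGaps]
    | cons b r =>
      simp only [List.map_cons, pvGaps]
      rw [show a + 1 + 1 = (a + 1) + 1 by ring,
          pv_gap_shift l ls (a + 1) b (by have := hnn a (by simp); omega)]
      have := ih (fun x hx => hnn x (by simp [hx]))
      simp only [List.map_cons] at this
      rw [this]

theorem pv_any_range_succ (n : Nat) (f : Int → Bool) :
    (PySem.List.pyRange 0 ((n : Int) + 1) 1).any f
      = (f 0 || (PySem.List.pyRange 0 (n : Int) 1).any (fun i => f (i + 1))) := by
  rw [PySem.List.pyRange_one_cons (by omega : (0:Int) < (n : Int) + 1)]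
  rw [List.any_cons]
  congr 1
  rw [show (0:Int) + 1 = 1 by ring]
  rw [PySem.List.pyRange_one 1 ((n : Int) + 1), PySem.List.pyRange_one 0 (n : Int)]
  have hn : ((n : Int) + 1 - 1).toNat = n := by omega
  have hn2 : ((n : Int) - 0).toNat = n := by omega
  rw [hn, hn2, List.any_map, List.any_map]
  apply PySem.List.any_congr_mem
  intro k hk
  simp only [Function.comp]
  congr 1
  omega

theorem pv_gap_00 (cs : List String) : pvA_gapBad cs 0 0 = false := by
  unfold pvA_gapBad
  rw [PySem.List.pyRange_one_eq_nil (by omega)]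
  rfl

theorem pv_idxs_cons_plus (l : String) (t : List String) (h : pvPl l = true) :
    pvIdxs (l :: t) 0 = 0 :: (pvIdxs t 0).map (· + 1) := by
  simp only [pvIdxs, h, if_true]
  rw [show (0:Int) + 1 = 0 + 1 by ring, pv_idxs_shift]

theorem pv_idxs_cons_nonplus (l : String) (t : List String) (h : pvPl l = false) :
    pvIdxs (l :: t) 0 = (pvIdxs t 0).map (· + 1) := by
  simp only [pvIdxs, h]
  rw [show (0:Int) + 1 = 0 + 1 by ring, pv_idxs_shift]
  simp

theorem pv_gaps_virt (l : String) (t : List String) (idx : List Int)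
    (hnn : ∀ x ∈ idx, 0 ≤ x) :
    pvGaps (l :: t) (0 :: idx.map (· + 1)) = pvGaps t ((-1) :: idx) := by
  have : (0 : Int) :: idx.map (· + 1) = ((-1 : Int) :: idx).map (· + 1) := by simp
  rw [this]
  apply pv_gaps_shift
  intro x hx
  rcases List.mem_cons.mp hx with rfl | hx
  · omega
  · have := hnn x hx; omega

theorem pv_chk_eq (ls : List String) : ∀ (pend : Bool),
    pvChk ls pend = (if (pvIdxs ls 0).isEmpty then true
      else !pend && !pvGaps ls ((-1) :: pvIdxs ls 0)) := by
  induction ls with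
  | nil => intro pend; simp [pvChk, pvIdxs]
  | cons l t ih =>
    intro pend
    by_cases hpl : pvPl l = true
    · rw [pv_idxs_cons_plus l t hpl]
      simp only [pvChk, hpl, if_true, List.isEmpty_cons]
      have hg : pvGaps (l :: t) ((-1) :: 0 :: (pvIdxs t 0).map (· + 1))
          = (pvA_gapBad (l :: t) 0 0 || pvGaps (l :: t) (0 :: (pvIdxs t 0).map (· + 1))) := by
        simp only [pvGaps]
        norm_num
      rw [hg, pv_gap_00, pv_gaps_virt l t _ (fun x hx => pv_idxs_nonneg t 0 x hx)]
      rw [ih false]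
      cases hidxt : (pvIdxs t 0) with
      | nil => cases pend <;> simp [pvGaps]
      | cons k0 r0 => cases pend <;> simp [pvGaps]
    · have hpl' : pvPl l = false := by simpa using hpl
      rw [pv_idxs_cons_nonplus l t hpl']
      simp only [pvChk, hpl', if_false, Bool.false_eq_true]
      rw [ih (pend || pvNbA l)]
      cases hidxt : (pvIdxs t 0) with
      | nil => simp
      | cons k0 r0 =>
        simp only [List.map_cons, List.isEmpty_cons]
        have hk0 : (0:Int) ≤ k0 := pv_idxs_nonneg t 0 k0 (by rw [hidxt]; simp)
        have hg1 : pvGaps (l :: t) ((-1) :: (k0 + 1) :: (r0.map (· + 1)))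
            = (pvA_gapBad (l :: t) 0 (k0 + 1) || pvGaps (l :: t) ((k0 + 1) :: r0.map (· + 1))) := by
          simp only [pvGaps]
          norm_num
        have hg2 : pvGaps (l :: t) ((k0 + 1) :: r0.map (· + 1)) = pvGaps t (k0 :: r0) := by
          have : (k0 + 1) :: r0.map (· + 1) = (k0 :: r0).map (· + 1) := by simp
          rw [this]
          apply pv_gaps_shift
          intro x hx
          have := pv_idxs_nonneg t 0 x (by rw [hidxt]; exact hx)
          omega
        have hg3 : pvGaps t ((-1) :: k0 :: r0)
            = (pvA_gapBad t 0 k0 || pvGaps t (k0 :: r0)) := by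
          simp only [pvGaps]
          norm_num
        rw [hg1, hg2, pv_gap_zero l t k0 hpl' hk0, hg3]
        cases pend <;> cases pvNbA l <;> cases pvA_gapBad t 0 k0 <;> cases pvGaps t (k0 :: r0) <;> simp

theorem pv_core_R (cs : List String) : pvAcore cs = pvR cs := by
  induction cs with
  | nil => simp [pvAcore, pvIdxs, pvR]
  | cons l t ih =>
    by_cases hpl : pvPl l = true
    · unfold pvAcore
      rw [pv_idxs_cons_plus l t hpl]
      simp only [List.isEmpty_cons, if_false, Bool.false_eq_true]
      unfold pvR
      rw [hpl, if_pos rfl, pv_chk_eq t false]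
      cases hidxt : (pvIdxs t 0) with
      | nil => simp [pvGaps]
      | cons k0 r0 =>
        rw [← hidxt, pv_gaps_virt l t _ (fun x hx => pv_idxs_nonneg t 0 x hx)]
        rw [hidxt]
        simp
    · have hpl' : pvPl l = false := by simpa using hpl
      unfold pvAcore
      rw [pv_idxs_cons_nonplus l t hpl']
      have hsh : pvGaps (l :: t) ((pvIdxs t 0).map (· + 1)) = pvGaps t (pvIdxs t 0) := by
        apply pv_gaps_shift
        intro x hx
        have := pv_idxs_nonneg t 0 x hx
        omega
      rw [hsh]
      unfold pvR
      rw [hpl', if_neg (show ¬(false = true) from by simp)]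
      rw [← ih]
      unfold pvAcore
      simp [List.isEmpty_map]

theorem pv_outer_eq (cs : List String) : ∀ (idx : List Int),
    ((PySem.List.pyRange 0 ((idx.length : Int) - 1) 1).any (fun i =>
      pvA_gapBad cs (PySem.List.pyGetD idx i 0 + 1) (PySem.List.pyGetD idx (i + 1) 0))) = pvGaps cs idx := by
  intro idx
  induction idx with
  | nil => rw [PySem.List.pyRange_one_eq_nil (by simp)]; rfl
  | cons a t ih =>
    cases t with
    | nil => rw [PySem.List.pyRange_one_eq_nil (by simp)]; rfl
    | cons b r =>
      have hb : (((a :: b :: r).length : Int) - 1) = ((r.length : Int) + 1) := by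
        simp only [List.length_cons]
        push_cast
        ring
      rw [hb, pv_any_range_succ r.length]
      simp only [pvGaps]
      congr 1
      · have h0 : PySem.List.pyGetD (a :: b :: r) (0 : Int) 0 = a := by
          simp [PySem.List.pyGetD_zero_cons]
        have h1 : PySem.List.pyGetD (a :: b :: r) ((0 : Int) + 1) 0 = b := by
          rw [pv_getD_shift a (b :: r) 0 0 le_rfl]
          simp [PySem.List.pyGetD_zero_cons]
        rw [h0, h1]
      · have hcg : ∀ i ∈ PySem.List.pyRange 0 (r.length : Int) 1,
            pvA_gapBad cs (PySem.List.pyGetD (a :: b :: r) (i + 1) 0 + 1) (PySem.List.pyGetD (a :: b :: r) (i + 1 + 1) 0)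
              = pvA_gapBad cs (PySem.List.pyGetD (b :: r) i 0 + 1) (PySem.List.pyGetD (b :: r) (i + 1) 0) := by
          intro i hi
          have hi0 : 0 ≤ i := (PySem.List.mem_pyRange_one.mp hi).1
          rw [pv_getD_shift a (b :: r) i 0 hi0, pv_getD_shift a (b :: r) (i + 1) 0 (by omega)]
        rw [PySem.List.any_congr_mem hcg]
        have hlen : ((r.length : Int)) = (((b :: r).length : Int) - 1) := by
          simp only [List.length_cons]
          push_cast
          ring
        rw [hlen]
        exact ih

theorem pv_nb_eq (l : String) : pvNbB l = pvNbA l := rfl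

theorem pv_A_eq_core (h : List String) :
    has_contiguous_additions h = pvAcore (pvA_content h) := by
  unfold pvAcore
  simp only [has_contiguous_additions]
  rw [pv_idx_eq, pv_outer_eq]

theorem pv_go_seen (ls : List String) : ∀ (pend : Bool),
    pvB_go ls true pend = pvChk (ls.filter pvKeep) pend := by
  induction ls with
  | nil => intro pend; simp [pvB_go, pvChk]
  | cons l t ih =>
    intro pend
    by_cases hs : pvB_skip l = true
    · have hk : pvKeep l = false := by simp [pvKeep, hs]
      simp [pvB_go, hs, hk, ih]
    · have hs' : pvB_skip l = false := by simpa using hs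
      have hk : pvKeep l = true := by simp [pvKeep, hs']
      by_cases hp : PySem.Str.startswith l "+" = true
      · have hp2 : pvPl l = true := hp
        have hpc : PySem.Chars.startswith l.toList ['+'] = true := by simpa using hp
        cases pend <;> simp [pvB_go, hs', hk, hp2, hpc, pvChk, ih]
      · have hp' : PySem.Str.startswith l "+" = false := by simpa using hp
        have hp2 : pvPl l = false := hp'
        have hpc : PySem.Chars.startswith l.toList ['+'] = false := by simpa using hp'
        simp [pvB_go, hs', hk, hp2, hpc, pvChk, pv_nb_eq, ih]

theorem pv_go_unseen (ls : List String) : ∀ (pend : Bool),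
    pvB_go ls false pend = pvR (ls.filter pvKeep) := by
  induction ls with
  | nil => intro pend; simp [pvB_go, pvR]
  | cons l t ih =>
    intro pend
    by_cases hs : pvB_skip l = true
    · have hk : pvKeep l = false := by simp [pvKeep, hs]
      simp [pvB_go, hs, hk, ih]
    · have hs' : pvB_skip l = false := by simpa using hs
      have hk : pvKeep l = true := by simp [pvKeep, hs']
      by_cases hp : PySem.Str.startswith l "+" = true
      · have hp2 : pvPl l = true := hp
        have hpc : PySem.Chars.startswith l.toList ['+'] = true := by simpa using hp
        simp [pvB_go, hs', hk, hp2, hpc, pvR, pv_go_seen]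
      · have hp' : PySem.Str.startswith l "+" = false := by simpa using hp
        have hp2 : pvPl l = false := hp'
        have hpc : PySem.Chars.startswith l.toList ['+'] = false := by simpa using hp'
        simp [pvB_go, hs', hk, hp2, hpc, pvR, ih]

-- ===== VERDICT (by name: the statement is the Claim_ definition above) =====
theorem has_contiguous_additions_spec : Claim_equal_has_contiguous_additions := by
  intro h _
  show has_contiguous_additions h = has_contiguous_additions_alt h
  rw [pv_A_eq_core, pv_content_eq, pv_core_R]
  unfold has_contiguous_additions_alt
  rw [pv_go_unseen]
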